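-- pv_equiv track=rewrite | github.com/jameshallam93/aoc23 | 7/7-1.py | get_multiples
-- ===== SOURCE A (Python) =====
-- def get_multiples(hand):
--     multiples = {}
--     for card in hand:
--         count_ = hand.count(card)
--         if count_ >= 1:
--             if multiples.get(count_) is None:
--                 multiples[count_] = {card}
--             else:
--                 multiples[count_].add(card)
--     return multiples
-- ===== SOURCE B (Python) =====
-- def get_multiples(hand):
--     def go(rest, acc):
--         if not rest:
--             return acc
--         card = rest[0]
--         remaining = [c for c in rest if c != card]
--         cnt = len(rest) - len(remaining)
--         if cnt in acc:
--             acc[cnt].add(card)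
--         else:
--             acc[cnt] = {card}
--         return go(remaining, acc)
--     return go(list(hand), {})
-- ===== Notes on version B (the rewrite author's own statement) =====
-- stated objective: faster
-- what changed: B is a recursive partition-and-conquer: it repeatedly takes the first remaining card, strips all its copies with one filter pass (deriving the count from the length difference, no .count call), records the card under that count, and recurses on the stripped list, so each distinct card is processed exactly once.
import Mathlib
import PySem

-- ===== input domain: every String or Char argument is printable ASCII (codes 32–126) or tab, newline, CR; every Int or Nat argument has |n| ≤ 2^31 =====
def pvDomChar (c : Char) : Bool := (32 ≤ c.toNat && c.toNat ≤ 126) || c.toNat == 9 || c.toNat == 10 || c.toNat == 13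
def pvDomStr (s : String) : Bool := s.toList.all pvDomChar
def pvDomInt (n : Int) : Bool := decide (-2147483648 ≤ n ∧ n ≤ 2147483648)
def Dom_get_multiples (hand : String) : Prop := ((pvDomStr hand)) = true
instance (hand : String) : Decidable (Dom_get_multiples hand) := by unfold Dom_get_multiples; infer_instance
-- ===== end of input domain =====

-- B replaces A's per-character hand.count scan by a recursive partition: strip all copies of the
-- first remaining card (count = length difference), record it, recurse; proved equal on all inputs.

-- ===== PORT A =====
def get_multiples (hand : String) : List (Int × List String) :=
  (hand.toList.foldl
    (fun (multiples : PySem.Dict Int (PySem.Set String)) (card : Char) =>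
      let count_ : Int := (PySem.Str.count hand (String.ofList [card]) : Int)
      if count_ ≥ 1 then
        match multiples.get? count_ with
        | none   => multiples.insert count_ (PySem.Set.ofList [String.ofList [card]])
        | some s => multiples.insert count_ (PySem.Set.add s (String.ofList [card]))
      else multiples)
    PySem.Dict.empty).items

-- ===== PORT B =====
-- literal port of Source B's recursive helper 'go'
def get_multiples_alt.go : List Char → PySem.Dict Int (PySem.Set String) →
    PySem.Dict Int (PySem.Set String)
  | [], acc => acc
  | card :: t, acc =>
    let remaining := (card :: t).filter (fun c => c ≠ card)
    let cnt : Int := (((card :: t).length : Int) - (remaining.length : Int))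
    let acc' :=
      if acc.contains cnt then
        acc.insert cnt (PySem.Set.add (acc.getD cnt PySem.Set.empty) (String.ofList [card]))
      else
        acc.insert cnt (PySem.Set.ofList [String.ofList [card]])
    get_multiples_alt.go remaining acc'
  termination_by rest _ => rest.length
  decreasing_by
    calc ((card :: t).filter (fun c => c ≠ card)).length
        = (t.filter (fun c => c ≠ card)).length := by
          rw [List.filter_cons, if_neg (by simp)]
      _ ≤ t.length := List.length_filter_le _ _
      _ < (card :: t).length := by simp

def get_multiples_alt (hand : String) : List (Int × List String) :=
  (get_multiples_alt.go hand.toList PySem.Dict.empty).items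

-- ===== PRECONDITION & SPEC =====
def Spec_get_multiples (hand : String) (out : List (Int × List String)) : Prop := out = get_multiples_alt hand
instance (hand : String) (out : List (Int × List String)) : Decidable (Spec_get_multiples hand out) := by unfold Spec_get_multiples; infer_instance

-- ===== CLAIM (what is proved, stated in full; the proofs are below) =====
def Claim_equal_get_multiples : Prop := ∀ (hand : String), Dom_get_multiples hand → Spec_get_multiples hand (get_multiples hand)

-- ===== LEMMAS AND PROOFS =====

-- the common step both programs reduce to: add the card to the set stored at key (its count in cs)
def pvStep (cs : List Char) (d : PySem.Dict Int (PySem.Set String)) (c : Char) :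
    PySem.Dict Int (PySem.Set String) :=
  d.insert ((cs.count c : Nat) : Int)
    (PySem.Set.add (d.getD ((cs.count c : Nat) : Int) PySem.Set.empty) (String.ofList [c]))

-- first occurrences in l of characters not already in seen
def pvFresh : List Char → List Char → List Char
  | [], _ => []
  | c :: t, seen => if c ∈ seen then pvFresh t seen else c :: pvFresh t (seen ++ [c])

-- invariant carried by A's dedup argument: every seen card is recorded under its count key
def pvInv (cs seen : List Char) (d : PySem.Dict Int (PySem.Set String)) : Prop :=
  d.keys.Nodup ∧
    ∀ c ∈ seen, ∃ s, d.get? ((cs.count c : Nat) : Int) = some s ∧ String.ofList [c] ∈ s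

theorem pvGoaux (c : Char) : ∀ (l : List Char) (fuel acc : Nat), l.length ≤ fuel →
    PySem.Chars.count.go [c] fuel l acc = acc + l.count c := by
  intro l
  induction l with
  | nil => intro fuel acc h; cases fuel <;> simp [PySem.Chars.count.go]
  | cons h t ih =>
    intro fuel acc hle
    cases fuel with
    | zero => simp at hle
    | succ n =>
      rw [PySem.Chars.count.go]
      by_cases hc : c = h
      · subst hc
        simp only [List.isPrefixOf, Bool.and_true, beq_self_eq_true, if_pos, List.length_cons] at *
        simp only [List.length_nil, List.drop_succ_cons, List.drop_zero]
        rw [ih _ _ (by omega)]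
        simp only [List.count_cons_self]
        omega
      · have hhc : (h == c) = false := by simp; exact fun hh => hc hh.symm
        have hp : ([c].isPrefixOf (h :: t)) = false := by
          simp [List.isPrefixOf]; exact hc
        rw [if_neg (by simp [hp])]
        rw [ih _ _ (by simpa using hle)]
        simp [List.count_cons, hhc]

theorem pvCharsCount_singleton (l : List Char) (c : Char) :
    PySem.Chars.count l [c] = l.count c := by
  simp [PySem.Chars.count, pvGoaux c l l.length 0 (le_refl _)]

theorem pvMapReplace {κ ν : Type} [BEq κ] [LawfulBEq κ] (k : κ) (v : ν) :
    ∀ (its : List (κ × ν)), (its.map Prod.fst).Nodup →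
      Option.map Prod.snd (List.find? (fun p => p.1 == k) its) = some v →
      its.map (fun p => if p.1 == k then (k, v) else p) = its := by
  intro its
  induction its with
  | nil => intro _ h; simp at h
  | cons p t ih =>
    intro hn hf
    rw [List.map_cons] at hn
    obtain ⟨hp, ht⟩ := List.nodup_cons.mp hn
    by_cases hk : (p.1 == k) = true
    · have hk' : p.1 = k := eq_of_beq hk
      have hv : p.2 = v := by
        simp only [List.find?_cons, hk] at hf
        simpa using hf
      have htail : t.map (fun q => if q.1 == k then (k, v) else q) = t := by
        have hall : ∀ q ∈ t, (fun q : κ × ν => if q.1 == k then (k, v) else q) q = q := by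
          intro q hq
          have hqk : (q.1 == k) = false := by
            rw [beq_eq_false_iff_ne]
            intro he
            exact hp (List.mem_map.mpr ⟨q, hq, by rw [he, hk']⟩)
          simp [hqk]
        calc t.map _ = t.map id := List.map_congr_left hall
          _ = t := List.map_id t
      simp only [List.map_cons, hk, if_pos, htail]
      rw [← hk', ← hv]
    · simp only [List.find?_cons, hk] at hf
      simp only [List.map_cons, hk, Bool.false_eq_true, ite_false]
      rw [ih ht (by simpa using hf)]

theorem pvInsert_eq_self {κ ν : Type} [BEq κ] [LawfulBEq κ]
    (d : PySem.Dict κ ν) (k : κ) (v : ν)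
    (hn : d.keys.Nodup) (h : d.get? k = some v) : d.insert k v = d := by
  have hc : d.contains k = true := by
    rw [PySem.Dict.contains_eq_isSome_get?, h]; rfl
  apply PySem.Dict.ext
  simp only [PySem.Dict.insert, hc, if_pos]
  exact pvMapReplace k v d.items hn (by simpa [PySem.Dict.get?] using h)

theorem pvStep_noop (cs : List Char) (d : PySem.Dict Int (PySem.Set String)) (c : Char)
    (hn : d.keys.Nodup) (s : PySem.Set String)
    (hs : d.get? ((cs.count c : Nat) : Int) = some s) (hm : String.ofList [c] ∈ s) :
    pvStep cs d c = d := by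
  unfold pvStep
  have hgd : d.getD ((cs.count c : Nat) : Int) PySem.Set.empty = s := by
    simp [PySem.Dict.getD, hs]
  rw [hgd, PySem.Set.add_of_mem hm]
  exact pvInsert_eq_self d _ s hn hs

theorem pvInv_preserve (cs seen : List Char) (d : PySem.Dict Int (PySem.Set String)) (c : Char)
    (h : pvInv cs seen d) : pvInv cs (seen ++ [c]) (pvStep cs d c) := by
  obtain ⟨hn, hmem⟩ := h
  refine ⟨PySem.Dict.nodup_keys_insert _ _ _ hn, ?_⟩
  intro c' hc'
  rcases List.mem_append.mp hc' with hc' | hc'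
  · obtain ⟨s', hs', hm'⟩ := hmem c' hc'
    by_cases hk : ((cs.count c' : Nat) : Int) = ((cs.count c : Nat) : Int)
    · refine ⟨PySem.Set.add (d.getD ((cs.count c : Nat) : Int) PySem.Set.empty) (String.ofList [c]), ?_, ?_⟩
      · rw [hk]; exact PySem.Dict.get?_insert_self _ _ _
      · have : d.getD ((cs.count c : Nat) : Int) PySem.Set.empty = s' := by
          simp [PySem.Dict.getD, ← hk, hs']
        rw [this]
        exact (PySem.Set.mem_add _ _ _).mpr (Or.inl hm')
    · exact ⟨s', by rw [pvStep, PySem.Dict.get?_insert_of_ne _ _ hk]; exact hs', hm'⟩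
  · have hcc : c' = c := by simpa using hc'
    subst hcc
    refine ⟨_, PySem.Dict.get?_insert_self _ _ _, ?_⟩
    exact (PySem.Set.mem_add _ _ _).mpr (Or.inr rfl)

-- A's fold skips repeated cards: it equals a fold over the fresh (first-occurrence) cards
theorem pvAux (cs : List Char) :
    ∀ (l seen : List Char) (d : PySem.Dict Int (PySem.Set String)), pvInv cs seen d →
      l.foldl (pvStep cs) d = (pvFresh l seen).foldl (pvStep cs) d := by
  intro l
  induction l with
  | nil => intro seen d _; rfl
  | cons c t ih =>
    intro seen d hinv
    by_cases hc : c ∈ seen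
    · obtain ⟨s, hs, hm⟩ := hinv.2 c hc
      simp only [pvFresh, hc, if_pos, List.foldl_cons]
      rw [pvStep_noop cs d c hinv.1 s hs hm]
      exact ih seen d hinv
    · simp only [pvFresh, hc, ite_false, List.foldl_cons]
      exact ih (seen ++ [c]) (pvStep cs d c) (pvInv_preserve cs seen d c hinv)

theorem pvA_eq_fold (hand : String) :
    get_multiples hand = (hand.toList.foldl (pvStep hand.toList) PySem.Dict.empty).items := by
  unfold get_multiples
  congr 1
  apply PySem.List.foldl_congr_mem
  intro d c hc
  have hcnt : PySem.Str.count hand (String.ofList [c]) = hand.toList.count c := by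
    rw [PySem.Str.count_eq]
    simp [pvCharsCount_singleton]
  have hge : ((PySem.Str.count hand (String.ofList [c]) : Nat) : Int) ≥ 1 := by
    rw [hcnt]
    exact_mod_cast Nat.succ_le_of_lt (List.count_pos_iff.mpr hc)
  simp only []
  rw [if_pos hge, hcnt]
  cases hg : d.get? ((hand.toList.count c : Nat) : Int) with
  | none =>
    have hgd : d.getD ((hand.toList.count c : Nat) : Int) PySem.Set.empty = PySem.Set.empty := by
      simp [PySem.Dict.getD, hg]
    rw [pvStep, hgd]
    rfl
  | some s =>
    have hgd : d.getD ((hand.toList.count c : Nat) : Int) PySem.Set.empty = s := by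
      simp [PySem.Dict.getD, hg]
    rw [pvStep, hgd]

-- pvFresh only looks at MEMBERSHIP in seen
theorem pvFresh_congr : ∀ (l s1 s2 : List Char), (∀ x, x ∈ s1 ↔ x ∈ s2) →
    pvFresh l s1 = pvFresh l s2 := by
  intro l
  induction l with
  | nil => intro _ _ _; rfl
  | cons c t ih =>
    intro s1 s2 he
    by_cases hc : c ∈ s1
    · simp only [pvFresh, hc, (he c).mp hc, if_pos]
      exact ih s1 s2 he
    · have hc2 : c ∉ s2 := fun h => hc ((he c).mpr h)
      simp only [pvFresh, hc, hc2, ite_false]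
      rw [ih (s1 ++ [c]) (s2 ++ [c]) (by intro x; simp [he x])]

-- marking c as seen = removing all its copies up front
theorem pvFresh_filter : ∀ (l s : List Char) (c : Char),
    pvFresh l (s ++ [c]) = pvFresh (l.filter (fun x => x ≠ c)) s := by
  intro l
  induction l with
  | nil => intro s c; rfl
  | cons x t ih =>
    intro s c
    by_cases hx : x = c
    · subst hx
      simp only [pvFresh, List.mem_append, List.mem_singleton, or_true, if_pos]
      rw [List.filter_cons, if_neg (by simp)]
      exact ih s x
    · rw [List.filter_cons, if_pos (by simp [hx])]
      by_cases hs : x ∈ s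
      · simp only [pvFresh, List.mem_append, hs, true_or, if_pos]
        exact ih s c
      · have hns : x ∉ s ++ [c] := by simp [hs, hx]
        simp only [pvFresh, hns, hs, ite_false]
        rw [pvFresh_congr t (s ++ [c] ++ [x]) ((s ++ [x]) ++ [c]) (by intro y; simp; tauto)]
        rw [ih (s ++ [x]) c]

-- the length drop of B's filter pass IS the count of the stripped card
theorem pvFilterCount (l : List Char) (c : Char) :
    (l.filter (fun x => x ≠ c)).length + l.count c = l.length := by
  induction l with
  | nil => rfl
  | cons x t ih =>
    by_cases hx : x = c
    · subst hx
      rw [List.filter_cons, if_neg (by simp)]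
      simp only [List.count_cons_self, List.length_cons]
      omega
    · rw [List.filter_cons, if_pos (by simp [hx]), List.count_cons_of_ne hx]
      simp only [List.length_cons]
      omega

-- B's recursion computes the fold of pvStep over the fresh cards, provided counts in rest agree with cs
theorem pvB_go_eq (cs : List Char) :
    ∀ (n : Nat) (rest : List Char), rest.length ≤ n →
      (∀ x ∈ rest, rest.count x = cs.count x) →
      ∀ acc, get_multiples_alt.go rest acc = (pvFresh rest []).foldl (pvStep cs) acc := by
  intro n
  induction n with
  | zero =>
    intro rest hle _ acc
    have : rest = [] := List.eq_nil_of_length_eq_zero (Nat.le_zero.mp hle)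
    subst this
    simp [get_multiples_alt.go, pvFresh]
  | succ m ih =>
    intro rest hle hcount acc
    cases rest with
    | nil => simp [get_multiples_alt.go, pvFresh]
    | cons card t =>
      rw [get_multiples_alt.go]
      have hrem : (card :: t).filter (fun c => c ≠ card) = t.filter (fun c => c ≠ card) := by
        rw [List.filter_cons, if_neg (by simp)]
      have hcnt : ((card :: t).length : Int) - (((card :: t).filter (fun c => c ≠ card)).length : Int)
          = ((cs.count card : Nat) : Int) := by
        have h1 := pvFilterCount (card :: t) card
        have h2 : (card :: t).count card = cs.count card := hcount card (by simp)
        omega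
      have hstep : (if acc.contains (((card :: t).length : Int) - (((card :: t).filter (fun c => c ≠ card)).length : Int)) then
            acc.insert (((card :: t).length : Int) - (((card :: t).filter (fun c => c ≠ card)).length : Int))
              (PySem.Set.add (acc.getD (((card :: t).length : Int) - (((card :: t).filter (fun c => c ≠ card)).length : Int)) PySem.Set.empty) (String.ofList [card]))
          else
            acc.insert (((card :: t).length : Int) - (((card :: t).filter (fun c => c ≠ card)).length : Int))
              (PySem.Set.ofList [String.ofList [card]])) = pvStep cs acc card := by
        rw [hcnt]
        by_cases hc : acc.contains ((cs.count card : Nat) : Int) = true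
        · rw [if_pos hc]; rfl
        · rw [if_neg hc]
          have hg : acc.get? ((cs.count card : Nat) : Int) = none := by
            rw [PySem.Dict.contains_eq_isSome_get?] at hc
            cases h : acc.get? ((cs.count card : Nat) : Int) with
            | none => rfl
            | some s => rw [h] at hc; simp at hc
          have hgd : acc.getD ((cs.count card : Nat) : Int) PySem.Set.empty = PySem.Set.empty := by
            simp [PySem.Dict.getD, hg]
          rw [pvStep, hgd]
          rfl
      rw [hstep, hrem]
      have hfresh : pvFresh (card :: t) [] = card :: pvFresh (t.filter (fun c => c ≠ card)) [] := by
        show (if card ∈ ([] : List Char) then _ else card :: pvFresh t ([] ++ [card]))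
            = card :: pvFresh (t.filter (fun c => c ≠ card)) []
        rw [if_neg (by simp), pvFresh_filter t [] card]
      rw [hfresh, List.foldl_cons]
      apply ih
      · have := List.length_filter_le (fun c => c ≠ card) t
        simp only [List.length_cons] at hle
        omega
      · intro x hx
        have hxc : x ≠ card := by
          rcases List.mem_filter.mp hx with ⟨_, hp⟩
          simpa using hp
        have h1 : (t.filter (fun c => c ≠ card)).count x = (card :: t).count x := by
          rw [List.count_cons_of_ne (fun h => hxc h.symm)]
          exact List.count_filter (by simp [hxc])
        rw [h1]
        exact hcount x (by
          rcases List.mem_filter.mp hx with ⟨hxt, _⟩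
          exact List.mem_cons_of_mem _ hxt)

theorem pvB_eq_fold (hand : String) :
    get_multiples_alt hand = ((pvFresh hand.toList []).foldl (pvStep hand.toList) PySem.Dict.empty).items := by
  unfold get_multiples_alt
  congr 1
  exact pvB_go_eq hand.toList hand.toList.length hand.toList (le_refl _) (fun _ _ => rfl) _

-- ===== VERDICT (by name: the statement is the Claim_ definition above) =====
theorem get_multiples_spec : Claim_equal_get_multiples := by
  intro hand _
  unfold Spec_get_multiples
  rw [pvA_eq_fold, pvB_eq_fold]
  congr 1
  exact pvAux hand.toList hand.toList [] PySem.Dict.empty ⟨PySem.Dict.nodup_keys_empty, by simp⟩
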